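-- pv_equiv track=rewrite | github.com/YetiCooler/Alexander-Method | utils.py | get_clean_io_name
-- ===== SOURCE A (Python) =====
-- def get_clean_io_name(input_string):
--     parts = input_string.split("-")
--
--     result_parts = []
--     started = False
--
--     for part in parts:
--         # Check if it's all uppercase
--         if not started and part.isupper():
--             continue  # Skip all-uppercase parts at the beginning
--         else:
--             started = True
--             result_parts.append(part)
--
--     # Join the remaining parts with spaces
--     return " ".join(result_parts)
-- ===== SOURCE B (Python) =====
-- def get_clean_io_name(input_string):
--     # Character-level recursion on the raw string: chop off one leading
--     # all-uppercase "xxx-" segment at a time via find/slicing; once the first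
--     # kept segment is reached, a single replace('-', ' ') finishes the job
--     # (no parts list, no join, no flag).
--     j = input_string.find("-")
--     if j == -1:
--         return "" if input_string.isupper() else input_string
--     if input_string[:j].isupper():
--         return get_clean_io_name(input_string[j + 1:])
--     return input_string.replace("-", " ")
-- ===== Notes on version B (the rewrite author's own statement) =====
-- stated objective: alternative
-- what changed: B never builds a parts list: it recurses on the raw string, using find and slicing to peel off one leading all-uppercase hyphen-terminated segment at a time, and finishes with a single replace of hyphens by spaces instead of split/accumulate/join.
import Mathlib
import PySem

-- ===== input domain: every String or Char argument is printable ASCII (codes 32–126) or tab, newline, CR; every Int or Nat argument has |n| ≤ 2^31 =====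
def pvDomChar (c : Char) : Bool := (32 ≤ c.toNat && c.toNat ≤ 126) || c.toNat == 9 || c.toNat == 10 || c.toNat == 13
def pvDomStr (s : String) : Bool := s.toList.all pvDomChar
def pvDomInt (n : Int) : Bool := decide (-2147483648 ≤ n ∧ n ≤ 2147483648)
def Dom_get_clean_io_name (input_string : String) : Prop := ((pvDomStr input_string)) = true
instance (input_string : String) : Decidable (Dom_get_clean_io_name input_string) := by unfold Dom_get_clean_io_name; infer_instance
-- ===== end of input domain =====

-- B never builds a parts list: it recurses on the raw string, peeling one leading
-- all-uppercase "xxx-" segment at a time via find('-') and slicing, and finishes with a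
-- single replace('-', ' ') — no split, no accumulator, no flag; same asymptotic cost.

-- Python str.isupper() on the ASCII domain: at least one cased (= alphabetic) character
-- and no lowercase one. Shared primitive helper for both ports.
def pyCharsIsupper (cs : List Char) : Bool :=
  cs.any PySem.Chars.isalpha && cs.all (fun c => !PySem.Chars.islower c)

-- ===== PORT A =====
def get_clean_io_name (input_string : String) : String :=
  let parts := PySem.Chars.splitOn input_string.toList "-".toList
  let st := parts.foldl
    (fun (st : Bool × List (List Char)) part =>
      if !st.1 && pyCharsIsupper part then st
      else (true, st.2 ++ [part]))
    (false, [])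
  String.ofList (PySem.Chars.join " ".toList st.2)

-- ===== PORT B =====
-- the recursive body of Source B, on the code points
def altGo (s : List Char) : List Char :=
  let j := PySem.Chars.find s "-".toList
  if h : j = -1 then
    if pyCharsIsupper s then [] else s
  else if pyCharsIsupper (PySem.List.slice s none (some j)) then
    altGo (PySem.List.slice s (some (j + 1)) none)
  else
    PySem.Chars.replace s "-".toList " ".toList
termination_by s.length
decreasing_by
  have hj0 : 0 ≤ j := by
    rcases (PySem.Chars.neg_one_le_find s "-".toList).lt_or_eq with h' | h'
    · omega
    · exact absurd h'.symm h
  have hspec := (PySem.Chars.find_spec (s := s) (sub := "-".toList) hj0).1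
  have hlt : j.toNat < s.length := by
    by_contra hge
    rw [List.drop_eq_nil_of_le (by omega)] at hspec
    simp at hspec
  rw [PySem.List.slice_from s (by omega : (0:Int) ≤ j + 1)]
  simp only [List.length_drop]
  omega

def get_clean_io_name_alt (input_string : String) : String :=
  String.ofList (altGo input_string.toList)

-- ===== PRECONDITION & SPEC =====
def Spec_get_clean_io_name (input_string : String) (out : String) : Prop := out = get_clean_io_name_alt input_string
instance (input_string : String) (out : String) : Decidable (Spec_get_clean_io_name input_string out) := by unfold Spec_get_clean_io_name; infer_instance

-- ===== CLAIM (what is proved, stated in full; the proofs are below) =====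
def Claim_equal_get_clean_io_name : Prop := ∀ (input_string : String), Dom_get_clean_io_name input_string → Spec_get_clean_io_name input_string (get_clean_io_name input_string)

-- ===== LEMMAS AND PROOFS =====

theorem modifyHead_id' {α : Type} (l : List α) : l.modifyHead (fun x => x) = l := by
  cases l <;> simp

-- simple structural model of splitting on a single character
def splitOn1 (d : Char) : List Char → List (List Char)
  | [] => [[]]
  | c :: t => if c = d then [] :: splitOn1 d t else (splitOn1 d t).modifyHead (c :: ·)

theorem splitOn1_ne_nil (d : Char) (s : List Char) : splitOn1 d s ≠ [] := by
  cases s with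
  | nil => simp [splitOn1]
  | cons c t =>
    simp only [splitOn1]
    split_ifs
    · simp
    · cases h : splitOn1 d t with
      | nil => exact absurd h (splitOn1_ne_nil d t)
      | cons a l => simp

theorem splitOn_go_eq (d : Char) (fuel : Nat) (l cur : List Char) (acc : List (List Char))
    (hf : l.length ≤ fuel) :
    PySem.Chars.splitOn.go [d] fuel l cur acc
      = acc.reverse ++ (splitOn1 d l).modifyHead (cur.reverse ++ ·) := by
  induction fuel generalizing l cur acc with
  | zero =>
    have : l = [] := by cases l <;> simp_all
    subst this
    rw [PySem.Chars.splitOn.go]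
    simp [splitOn1]
  | succ fuel ih =>
    cases l with
    | nil =>
      rw [PySem.Chars.splitOn.go]
      simp [splitOn1]
      omega
    | cons c t =>
      rw [PySem.Chars.splitOn.go]
      simp only [List.length_cons] at hf
      by_cases hc : c = d
      · have hpre : [d].isPrefixOf (c :: t) = true := by simp [List.isPrefixOf, hc]
        rw [if_pos hpre]
        have hdrop : List.drop [d].length (c :: t) = t := by simp
        rw [hdrop, ih t [] (cur.reverse :: acc) (by omega)]
        simp [splitOn1, hc, modifyHead_id']
      · have hpre : [d].isPrefixOf (c :: t) = false := by
          simp [List.isPrefixOf]; exact fun h => hc h.symm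
        rw [if_neg (by simp [hpre])]
        rw [ih t (c :: cur) acc (by omega)]
        simp only [splitOn1, if_neg hc]
        rw [List.modifyHead_modifyHead]
        simp [Function.comp_def]

theorem splitOn_eq_splitOn1 (d : Char) (s : List Char) :
    PySem.Chars.splitOn s [d] = splitOn1 d s := by
  unfold PySem.Chars.splitOn
  rw [splitOn_go_eq d (s.length + 1) s [] [] (by omega)]
  simp [modifyHead_id']

theorem replace_go_eq (d w : Char) (fuel : Nat) (l acc : List Char) (hf : l.length ≤ fuel) :
    PySem.Chars.replace.go [d] [w] fuel l acc
      = acc.reverse ++ l.map (fun c => if c = d then w else c) := by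
  induction fuel generalizing l acc with
  | zero =>
    have : l = [] := by cases l <;> simp_all
    subst this
    rw [PySem.Chars.replace.go]
    simp
  | succ fuel ih =>
    cases l with
    | nil =>
      rw [PySem.Chars.replace.go]
      simp
      omega
    | cons c t =>
      rw [PySem.Chars.replace.go]
      simp only [List.length_cons] at hf
      by_cases hc : c = d
      · have hpre : [d].isPrefixOf (c :: t) = true := by simp [List.isPrefixOf, hc]
        rw [if_pos hpre]
        have hdrop : List.drop [d].length (c :: t) = t := by simp
        rw [hdrop, ih t ([w].reverse ++ acc) (by omega)]
        simp [hc]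
      · have hpre : [d].isPrefixOf (c :: t) = false := by
          simp [List.isPrefixOf]; exact fun h => hc h.symm
        rw [if_neg (by simp [hpre])]
        rw [ih t (c :: acc) (by omega)]
        simp [hc]

theorem replace_eq_map (d w : Char) (s : List Char) :
    PySem.Chars.replace s [d] [w] = s.map (fun c => if c = d then w else c) := by
  unfold PySem.Chars.replace
  rw [if_neg (by simp)]
  rw [replace_go_eq d w s.length s [] le_rfl]
  simp

theorem join1_eq_map (d w : Char) (s : List Char) :
    PySem.Chars.join [w] (splitOn1 d s) = s.map (fun c => if c = d then w else c) := by
  induction s with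
  | nil => simp [splitOn1, PySem.Chars.join_singleton]
  | cons c t ih =>
    simp only [splitOn1]
    by_cases hc : c = d
    · rw [if_pos hc]
      cases h : splitOn1 d t with
      | nil => exact absurd h (splitOn1_ne_nil d t)
      | cons p ps =>
        rw [h] at ih
        rw [PySem.Chars.join_cons_cons]
        simp [hc, ← ih]
    · rw [if_neg hc]
      cases h : splitOn1 d t with
      | nil => exact absurd h (splitOn1_ne_nil d t)
      | cons p ps =>
        rw [h] at ih
        simp only [List.modifyHead]
        cases ps with
        | nil =>
          rw [PySem.Chars.join_singleton]
          rw [PySem.Chars.join_singleton] at ih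
          simp [hc, ih]
        | cons q qs =>
          rw [PySem.Chars.join_cons_cons]
          rw [PySem.Chars.join_cons_cons] at ih
          simp [hc, ← ih]

theorem splitOn1_of_not_mem (d : Char) (s : List Char) (h : d ∉ s) : splitOn1 d s = [s] := by
  induction s with
  | nil => simp [splitOn1]
  | cons c t ih =>
    simp only [List.mem_cons, not_or] at h
    have hc : ¬ c = d := fun hcd => h.1 hcd.symm
    simp [splitOn1, hc, ih h.2]

theorem splitOn1_split (d : Char) (s : List Char) (j : Nat)
    (hj : s[j]? = some d) (hfirst : ∀ i < j, s[i]? ≠ some d) :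
    splitOn1 d s = s.take j :: splitOn1 d (s.drop (j + 1)) := by
  induction s generalizing j with
  | nil => simp at hj
  | cons c t ih =>
    cases j with
    | zero =>
      simp at hj
      simp [splitOn1, hj]
    | succ j =>
      have hc : ¬ c = d := by
        have := hfirst 0 (by omega)
        simpa using this
      simp only [List.getElem?_cons_succ] at hj
      have hfirst' : ∀ i < j, t[i]? ≠ some d := by
        intro i hi
        have := hfirst (i + 1) (by omega)
        simpa using this
      simp [splitOn1, hc, ih j hj hfirst']

-- ===== A-side characterization (the fold with the flag = dropWhile) =====

theorem foldl_started (parts acc : List (List Char)) :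
    (parts.foldl
      (fun (st : Bool × List (List Char)) part =>
        if !st.1 && pyCharsIsupper part then st
        else (true, st.2 ++ [part]))
      (true, acc)) = (true, acc ++ parts) := by
  induction parts generalizing acc with
  | nil => simp
  | cons p ps ih =>
    rw [List.foldl_cons]
    simp only [Bool.not_true, Bool.false_and, Bool.false_eq_true, if_false, ih]
    simp

theorem foldl_not_started (parts acc : List (List Char)) :
    (parts.foldl
      (fun (st : Bool × List (List Char)) part =>
        if !st.1 && pyCharsIsupper part then st
        else (true, st.2 ++ [part]))
      (false, acc)).2 = acc ++ parts.dropWhile pyCharsIsupper := by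
  induction parts generalizing acc with
  | nil => simp
  | cons p ps ih =>
    rw [List.foldl_cons, List.dropWhile_cons]
    cases h : pyCharsIsupper p with
    | true => simp only [Bool.not_false, Bool.true_and, if_true, ih]
    | false =>
      simp only [Bool.not_false, Bool.true_and, Bool.false_eq_true, if_false, foldl_started]
      simp

-- ===== the main bridge: dropWhile over splitOn1 = altGo =====

theorem main_bridge (s : List Char) :
    PySem.Chars.join [' '] ((splitOn1 '-' s).dropWhile pyCharsIsupper) = altGo s := by
  rw [altGo]
  by_cases hfind : PySem.Chars.find s "-".toList = -1
  · rw [dif_pos hfind]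
    have hnm : '-' ∉ s := by
      rw [PySem.Chars.find_eq_neg_one_iff] at hfind
      intro hm
      obtain ⟨l1, l2, hsplit⟩ := List.append_of_mem hm
      exact hfind ⟨l1, l2, by rw [hsplit]; simp⟩
    rw [splitOn1_of_not_mem _ _ hnm, List.dropWhile_cons]
    cases h : pyCharsIsupper s with
    | true => simp [PySem.Chars.join_nil]
    | false => simp [PySem.Chars.join_singleton]
  · rw [dif_neg hfind]
    have hj0 : 0 ≤ PySem.Chars.find s "-".toList := by
      rcases (PySem.Chars.neg_one_le_find s "-".toList).lt_or_eq with h' | h'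
      · omega
      · exact absurd h'.symm hfind
    set j := PySem.Chars.find s "-".toList with hjdef
    have hspec := PySem.Chars.find_spec (s := s) (sub := "-".toList) hj0
    have hlt : j.toNat < s.length := by
      by_contra hge
      have := hspec.1
      rw [List.drop_eq_nil_of_le (by omega)] at this
      simp at this
    have hget : s[j.toNat]? = some '-' := by
      obtain ⟨rest, hrest⟩ := hspec.1
      have hdrop : s.drop j.toNat = '-' :: rest := by simpa using hrest.symm
      rw [List.getElem?_eq_getElem hlt]
      have hh := congrArg (·.head?) hdrop
      simpa [List.head?_drop, List.getElem?_eq_getElem hlt] using hh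
    have hfirst : ∀ i < j.toNat, s[i]? ≠ some '-' := by
      intro i hi hcontra
      apply hspec.2 i hi
      have hilt : i < s.length := by omega
      refine ⟨s.drop (i + 1), ?_⟩
      have hdi : s.drop i = '-' :: s.drop (i + 1) := by
        rw [List.drop_eq_getElem_cons hilt]
        simp [List.getElem?_eq_getElem hilt] at hcontra
        rw [hcontra]
      simpa using hdi.symm
    rw [splitOn1_split '-' s j.toNat hget hfirst, List.dropWhile_cons]
    rw [PySem.List.slice_to s hj0, PySem.List.slice_from s (by omega : (0:Int) ≤ j + 1)]
    have htonat : (j + 1).toNat = j.toNat + 1 := by omega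
    rw [htonat]
    cases h : pyCharsIsupper (s.take j.toNat) with
    | true =>
      simp only [if_true]
      exact main_bridge (s.drop (j.toNat + 1))
    | false =>
      simp only [Bool.false_eq_true, if_false]
      rw [← splitOn1_split '-' s j.toNat hget hfirst]
      rw [join1_eq_map, ← replace_eq_map]
      rfl
termination_by s.length
decreasing_by simp only [List.length_drop]; omega

-- ===== VERDICT (by name: the statement is the Claim_ definition above) =====
theorem get_clean_io_name_spec : Claim_equal_get_clean_io_name := by
  intro s _
  unfold Spec_get_clean_io_name get_clean_io_name get_clean_io_name_alt
  simp only [foldl_not_started, List.nil_append]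
  have h1 : ("-".toList : List Char) = ['-'] := rfl
  have h2 : (" ".toList : List Char) = [' '] := rfl
  rw [h1, h2, splitOn_eq_splitOn1, main_bridge]
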